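-- pv_equiv track=rewrite | github.com/ETOgaosion/verl | verl/utils/seqlen_balancing.py | snake_partition_full
-- ===== SOURCE A (Python) =====
-- def snake_partition_full(seqlen_list: list[int], k_partitions: int, equal_size: bool) -> list[list[int]]:
--     """Partition indices using a full symmetric snake pattern.
--
--     Uses 0→k-1→k-1→0 repeating, i.e. pattern length 2k with endpoints included.
--     """
--     assert k_partitions > 0, "k_partitions must be > 0"
--     assert len(seqlen_list) >= k_partitions, f"{len(seqlen_list)} < {k_partitions}"
--     if k_partitions == 1:
--         return [list(range(len(seqlen_list)))]
--
--     if equal_size: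
--         assert len(seqlen_list) % k_partitions == 0, f"{len(seqlen_list)} % {k_partitions} != 0"
--         target_size = len(seqlen_list) // k_partitions
--     else:
--         target_size = None
--
--     sorted_pairs = sorted(enumerate(seqlen_list), key=lambda x: x[1], reverse=True)
--     partitions: list[list[int]] = [[] for _ in range(k_partitions)]
--
--     pattern = list(range(k_partitions)) + list(range(k_partitions - 1, -1, -1))
--     pattern_len = len(pattern)
--     ptr = 0
--
--     for orig_idx, _ in sorted_pairs:
--         attempts = 0
--         while True:
--             p = pattern[ptr % pattern_len]
--             ptr += 1
--             if target_size is None or len(partitions[p]) < target_size: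
--                 partitions[p].append(orig_idx)
--                 break
--             attempts += 1
--             if attempts > k_partitions * 2:
--                 raise RuntimeError("Failed to assign partition in snake_partition_full")
--
--     if target_size is not None:
--         for i, partition in enumerate(partitions):
--             assert len(partition) == target_size, f"partition {i} size {len(partition)} != {target_size}"
--
--     return partitions
-- ===== SOURCE B (Python) =====
-- def snake_partition_full(seqlen_list: list[int], k_partitions: int, equal_size: bool) -> list[list[int]]:
--     """Partition indices using a full symmetric snake pattern.
--
--     Builds each partition independently: partition p takes, from the
--     descending-sorted order, the mirror pair of positions (p, 2k-1-p) of every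
--     block of 2k consecutive positions.
--     """
--     assert k_partitions > 0, "k_partitions must be > 0"
--     assert len(seqlen_list) >= k_partitions, f"{len(seqlen_list)} < {k_partitions}"
--     if k_partitions == 1:
--         return [list(range(len(seqlen_list)))]
--     if equal_size:
--         assert len(seqlen_list) % k_partitions == 0, f"{len(seqlen_list)} % {k_partitions} != 0"
--     order = [idx for idx, _ in sorted(enumerate(seqlen_list), key=lambda x: x[1], reverse=True)]
--     n = len(order)
--     period = 2 * k_partitions
--     partitions = []
--     for p in range(k_partitions):
--         part = []
--         lo, hi = p, period - 1 - p
--         while lo < n: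
--             part.append(order[lo])
--             if hi < n:
--                 part.append(order[hi])
--             lo += period
--             hi += period
--         partitions.append(part)
--     return partitions
-- ===== Notes on version B (the rewrite author's own statement) =====
-- stated objective: alternative
-- what changed: Instead of dealing sorted items one by one into partitions via a pattern table, a pointer and a retry loop (whose skip/RuntimeError path is dead code), B constructs each partition independently: for each p it walks the sorted order in blocks of 2k positions, taking the mirror pair (p, 2k-1-p) of every block.
import Mathlib
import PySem

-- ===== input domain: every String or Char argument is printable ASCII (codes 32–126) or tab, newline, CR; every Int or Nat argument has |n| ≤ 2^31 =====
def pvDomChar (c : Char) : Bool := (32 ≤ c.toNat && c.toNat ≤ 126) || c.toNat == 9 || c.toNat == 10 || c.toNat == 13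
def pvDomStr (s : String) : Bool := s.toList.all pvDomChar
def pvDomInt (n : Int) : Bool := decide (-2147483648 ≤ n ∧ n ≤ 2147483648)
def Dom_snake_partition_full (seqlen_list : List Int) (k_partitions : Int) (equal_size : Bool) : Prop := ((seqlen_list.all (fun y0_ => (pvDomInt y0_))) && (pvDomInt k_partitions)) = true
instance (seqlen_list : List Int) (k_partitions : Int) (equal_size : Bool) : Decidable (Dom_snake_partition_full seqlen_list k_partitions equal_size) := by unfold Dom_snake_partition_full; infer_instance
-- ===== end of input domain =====

-- B builds each partition independently from mirror-pair positions of 2k-blocks of the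
-- sorted order, instead of A's one-by-one deal with a pattern table, a pointer and a
-- retry loop (whose skip/RuntimeError path is dead code); objective: alternative.

-- ===== PORT A =====
-- inner 'while True' of A: fuel counts remaining attempts before the RuntimeError;
-- the fuel-0 branch is Python's 'raise RuntimeError' (unreachable: the snake pattern never
-- chooses a full partition, as proved below; Pre_ covers the asserts only)
def pvAInner (target : Option Int) (pattern : List Int) (patternLen : Int) (origIdx : Int) :
    Nat → List (List Int) × Int → List (List Int) × Int
  | 0, st => st
  | fuel+1, (parts, ptr) =>
      let p := PySem.List.pyGetD pattern (PySem.Int.mod ptr patternLen) 0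
      let ptr' := ptr + 1
      match target with
      | none => (PySem.List.pySetD parts p ((PySem.List.pyGetD parts p []) ++ [origIdx]), ptr')
      | some t =>
          if ((PySem.List.pyGetD parts p []).length : Int) < t then
            (PySem.List.pySetD parts p ((PySem.List.pyGetD parts p []) ++ [origIdx]), ptr')
          else
            pvAInner target pattern patternLen origIdx fuel (parts, ptr')

-- failed 'assert' raises AssertionError: those inputs are excluded by Pre_; the port returns [] there
def snake_partition_full (seqlen_list : List Int) (k_partitions : Int) (equal_size : Bool) : List (List Int) :=
  if ¬ (k_partitions > 0) then []
  else if ¬ ((seqlen_list.length : Int) ≥ k_partitions) then []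
  else if k_partitions = 1 then [PySem.List.pyRange 0 (seqlen_list.length : Int) 1]
  else if equal_size ∧ ¬ (PySem.Int.mod (seqlen_list.length : Int) k_partitions = 0) then []
  else
    let target : Option Int :=
      if equal_size then some (PySem.Int.floordiv (seqlen_list.length : Int) k_partitions) else none
    let sorted_pairs := PySem.List.sorted (PySem.List.enumerate seqlen_list 0) (fun x => x.2) true
    let partitions : List (List Int) := List.replicate k_partitions.toNat []
    let pattern : List Int :=
      PySem.List.pyRange 0 k_partitions 1 ++ PySem.List.pyRange (k_partitions - 1) (-1) (-1)
    let patternLen : Int := (pattern.length : Int)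
    let res := sorted_pairs.foldl
      (fun st pr => pvAInner target pattern patternLen pr.1 (2 * k_partitions + 2).toNat st)
      (partitions, 0)
    match target with
    | none => res.1
    | some t => if res.1.all (fun partition => (partition.length : Int) = t) then res.1 else []

-- ===== PORT B =====
-- inner 'while lo < n' of B: appends order[lo] and, if in range, order[hi], then jumps a
-- full block ahead; fuel bounds the iterations (order.length + 1 suffices, since lo grows
-- by period ≥ 2 each step); order[lo]/order[hi] are in range, pyGetD is exact there
def pvCollect (order : List Int) (n period : Int) : Nat → Int → Int → List Int
  | 0, _, _ => []
  | fuel+1, lo, hi =>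
      if lo < n then
        PySem.List.pyGetD order lo 0 ::
          ((if hi < n then [PySem.List.pyGetD order hi 0] else []) ++
            pvCollect order n period fuel (lo + period) (hi + period))
      else []

def snake_partition_full_alt (seqlen_list : List Int) (k_partitions : Int) (equal_size : Bool) : List (List Int) :=
  if ¬ (k_partitions > 0) then []
  else if ¬ ((seqlen_list.length : Int) ≥ k_partitions) then []
  else if k_partitions = 1 then [PySem.List.pyRange 0 (seqlen_list.length : Int) 1]
  else if equal_size ∧ ¬ (PySem.Int.mod (seqlen_list.length : Int) k_partitions = 0) then []
  else
    let order := (PySem.List.sorted (PySem.List.enumerate seqlen_list 0) (fun x => x.2) true).map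
      (fun pr => pr.1)
    let n : Int := (order.length : Int)
    let period : Int := 2 * k_partitions
    (PySem.List.pyRange 0 k_partitions 1).map
      (fun p => pvCollect order n period (order.length + 1) p (period - 1 - p))

-- ===== PRECONDITION & SPEC =====
-- Pre_ excludes exactly the inputs on which A's asserts raise AssertionError:
-- k_partitions ≤ 0, fewer elements than partitions, or equal_size with a length not divisible by k_partitions.
def Pre_snake_partition_full (seqlen_list : List Int) (k_partitions : Int) (equal_size : Bool) : Prop :=
  0 < k_partitions ∧ k_partitions ≤ (seqlen_list.length : Int) ∧
    (equal_size = true → PySem.Int.mod (seqlen_list.length : Int) k_partitions = 0)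
instance (seqlen_list : List Int) (k_partitions : Int) (equal_size : Bool) : Decidable (Pre_snake_partition_full seqlen_list k_partitions equal_size) := by unfold Pre_snake_partition_full; infer_instance

def pvWitness_snake_partition_full : List Int × Int × Bool := ([5, 1, 4, 2, 3, 6], 3, true)

def Spec_snake_partition_full (seqlen_list : List Int) (k_partitions : Int) (equal_size : Bool) (out : List (List Int)) : Prop := out = snake_partition_full_alt seqlen_list k_partitions equal_size
instance (seqlen_list : List Int) (k_partitions : Int) (equal_size : Bool) (out : List (List Int)) : Decidable (Spec_snake_partition_full seqlen_list k_partitions equal_size out) := by unfold Spec_snake_partition_full; infer_instance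

-- ===== CLAIM (what is proved, stated in full; the proofs are below) =====
def Claim_equal_snake_partition_full : Prop := ∀ (seqlen_list : List Int) (k_partitions : Int) (equal_size : Bool), Dom_snake_partition_full seqlen_list k_partitions equal_size → Pre_snake_partition_full seqlen_list k_partitions equal_size → Spec_snake_partition_full seqlen_list k_partitions equal_size (snake_partition_full seqlen_list k_partitions equal_size)

-- ===== LEMMAS AND PROOFS =====

lemma pvCount_mod (q r n : Nat) (hq : 0 < q) (hr : r < q) :
    (List.range n).countP (fun j => j % q = r) = n / q + if r < n % q then 1 else 0 := by
  induction n with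
  | zero => simp
  | succ n ih =>
    rw [List.range_succ, List.countP_append, ih]
    have hdm := Nat.div_add_mod n q
    have hm : n % q < q := Nat.mod_lt _ hq
    by_cases hcase : n % q + 1 = q
    · have he : n + 1 = q * (n / q) + q := by omega
      have h1 : (n+1)/q = n/q + 1 := by
        rw [he, Nat.mul_add_div hq, Nat.div_self hq]
      have h2 : (n+1)%q = 0 := by rw [he, Nat.mul_add_mod, Nat.mod_self]
      rw [h1, h2]
      simp only [List.countP_cons, List.countP_nil]
      split_ifs <;> simp only [decide_eq_true_eq] at * <;> try omega
    · have he : n + 1 = q * (n / q) + (n % q + 1) := by omega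
      have hz : (n % q + 1)/q = 0 := Nat.div_eq_of_lt (by omega)
      have h1 : (n+1)/q = n/q := by
        rw [he, Nat.mul_add_div hq, hz]; omega
      have h2 : (n+1)%q = n % q + 1 := by
        rw [he, Nat.mul_add_mod, Nat.mod_eq_of_lt (by omega)]
      rw [h1, h2]
      simp only [List.countP_cons, List.countP_nil]
      split_ifs <;> simp only [decide_eq_true_eq] at * <;> try omega

def pvPat (k j : Nat) : Nat :=
  if j % (2 * k) < k then j % (2 * k) else 2 * k - 1 - (j % (2 * k))

lemma pvCountP_or (l : List Nat) (P Q : Nat → Bool) (h : ∀ a ∈ l, ¬(P a = true ∧ Q a = true)) :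
    l.countP (fun a => P a || Q a) = l.countP P + l.countP Q := by
  induction l with
  | nil => simp
  | cons x xs ih =>
    simp only [List.countP_cons]
    rw [ih (fun a ha => h a (List.mem_cons_of_mem _ ha))]
    have := h x (List.mem_cons_self)
    cases hP : P x <;> cases hQ : Q x <;> simp_all <;> omega

def pvCnt (k i p : Nat) : Nat := (List.range i).countP (fun j => pvPat k j = p)

lemma pvCnt_full (k n p : Nat) (hk : 0 < k) (hp : p < k) (hdvd : k ∣ n) :
    pvCnt k n p = n / k := by
  obtain ⟨m, rfl⟩ := hdvd
  have h2k : 0 < 2 * k := by omega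
  have hcongr : pvCnt k (k*m) p
      = (List.range (k*m)).countP (fun j => decide (j % (2*k) = p) || decide (j % (2*k) = 2*k-1-p)) := by
    apply List.countP_congr
    intro j _
    have hm : j % (2*k) < 2*k := Nat.mod_lt _ h2k
    simp only [pvPat]
    by_cases h : j % (2*k) < k <;> simp [h] <;> omega
  rw [hcongr, pvCountP_or _ _ _ (by intro a _; simp; omega)]
  rw [pvCount_mod _ _ _ h2k (by omega), pvCount_mod _ _ _ h2k (by omega)]
  rw [Nat.mul_div_cancel_left _ hk]
  rcases Nat.even_or_odd m with ⟨a, rfl⟩ | ⟨a, rfl⟩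
  · have he : k * (a + a) = 2*k*a + 0 := by ring
    rw [he, Nat.mul_add_div h2k, Nat.mul_add_mod]
    simp
  · have he : k * (2*a+1) = 2*k*a + k := by ring
    rw [he, Nat.mul_add_div h2k, Nat.mul_add_mod, Nat.div_eq_of_lt (by omega), Nat.mod_eq_of_lt (by omega)]
    split_ifs <;> omega

lemma pvPattern_getI (K : Int) (hK : 2 ≤ K) (m : Int) (h0 : 0 ≤ m) (hm : m < 2*K) :
    PySem.List.pyGetD (PySem.List.pyRange 0 K 1 ++ PySem.List.pyRange (K - 1) (-1) (-1)) m 0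
      = if m < K then m else 2*K - 1 - m := by
  have hrev : PySem.List.pyRange (K - 1) (-1) (-1) = (PySem.List.pyRange 0 K 1).reverse := by
    have := PySem.List.pyRange_neg_one_eq_reverse (K - 1) (-1)
    simpa using this
  have hlen1 : (PySem.List.pyRange 0 K 1).length = K.toNat := by
    rw [PySem.List.length_pyRange_one]; omega
  have hlen : (PySem.List.pyRange 0 K 1 ++ PySem.List.pyRange (K - 1) (-1) (-1)).length = K.toNat + K.toNat := by
    simp [hrev, hlen1]
  rw [PySem.List.pyGetD_eq_getElem _ _ h0 (by rw [hlen]; push_cast; omega)]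
  by_cases hc : m < K
  · rw [List.getElem_append_left (by rw [hlen1]; omega)]
    rw [PySem.List.getElem_pyRange_one]
    simp [hc]; omega
  · rw [List.getElem_append_right (by rw [hlen1]; omega)]
    simp only [hrev, List.getElem_reverse]
    rw [PySem.List.getElem_pyRange_one]
    simp [hc, hlen1]
    omega

-- pattern length as an Int
lemma pvPatternLen (K : Int) (hK : 2 ≤ K) :
    (((PySem.List.pyRange 0 K 1 ++ PySem.List.pyRange (K - 1) (-1) (-1)).length : Nat) : Int) = 2 * K := by
  have := PySem.List.pyRange_neg_one_eq_reverse (K - 1) (-1)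
  simp only [List.length_append, PySem.List.length_pyRange_one, this, List.length_reverse]
  omega

lemma pvA_step_none (K : Int) (hK : 2 ≤ K) (idx : Int) (parts : List (List Int)) (ptr : Int) :
    pvAInner none (PySem.List.pyRange 0 K 1 ++ PySem.List.pyRange (K - 1) (-1) (-1))
        (((PySem.List.pyRange 0 K 1 ++ PySem.List.pyRange (K - 1) (-1) (-1)).length : Nat) : Int)
        idx ((2*K+2).toNat) (parts, ptr)
      = (let m := PySem.Int.mod ptr (2*K)
         let p := if m < K then m else 2*K-1-m
         (PySem.List.pySetD parts p ((PySem.List.pyGetD parts p []) ++ [idx]), ptr + 1)) := by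
  have hfuel : (2*K+2).toNat = (2*K+1).toNat + 1 := by omega
  rw [hfuel]
  simp only [pvAInner, pvPatternLen K hK,
    pvPattern_getI K hK _ (PySem.Int.mod_nonneg ptr (by omega)) (PySem.Int.mod_lt ptr (by omega))]

lemma pvCast_p (K : Int) (hK : 2 ≤ K) (i : Nat) :
    (if PySem.Int.mod (i : Int) (2*K) < K then PySem.Int.mod (i : Int) (2*K)
     else 2*K-1-PySem.Int.mod (i : Int) (2*K)) = ((pvPat K.toNat i : Nat) : Int) := by
  have h2K : (2*K) = ((2*K.toNat : Nat) : Int) := by push_cast; omega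
  rw [h2K, PySem.Int.mod_natCast]
  simp only [pvPat]
  have : i % (2*K.toNat) < 2*K.toNat := Nat.mod_lt _ (by omega)
  split_ifs <;> omega

lemma pvCnt_succ (k i p : Nat) :
    pvCnt k (i + 1) p = pvCnt k i p + if pvPat k i = p then 1 else 0 := by
  simp [pvCnt, List.range_succ, List.countP_append, List.countP_cons]

lemma pvCnt_lt (k n i p : Nat) (hk : 0 < k) (hi : i < n) (hdvd : k ∣ n)
    (hp : pvPat k i = p) : pvCnt k i p < n / k := by
  have h1 : pvCnt k i p + 1 ≤ pvCnt k (i + 1) p := by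
    rw [pvCnt_succ, hp]; simp
  have h2 : pvCnt k (i + 1) p ≤ pvCnt k n p :=
    List.Sublist.countP_le ((List.range_sublist).mpr hi)
  have hpk : p < k := by
    subst hp
    simp only [pvPat]
    have : i % (2*k) < 2*k := Nat.mod_lt _ (by omega)
    split_ifs <;> omega
  have := pvCnt_full k n p hk hpk hdvd
  omega

lemma pvLoop_eq_some (K : Int) (hK : 2 ≤ K) (n : Nat) (hdvd : K.toNat ∣ n)
    (L : List (Int × Int)) :
    ∀ (i : Nat) (parts : List (List Int)),
    i + L.length = n →
    parts.length = K.toNat →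
    (∀ p, p < K.toNat → (parts.getD p []).length = pvCnt K.toNat i p) →
    (L.foldl (fun st pr => pvAInner (some ((n / K.toNat : Nat) : Int))
        (PySem.List.pyRange 0 K 1 ++ PySem.List.pyRange (K - 1) (-1) (-1))
        (((PySem.List.pyRange 0 K 1 ++ PySem.List.pyRange (K - 1) (-1) (-1)).length : Nat) : Int)
        pr.1 ((2*K+2).toNat) st) (parts, (i:Int)))
      = (L.foldl (fun (st : List (List Int) × Int) pr =>
          let m := PySem.Int.mod st.2 (2*K)
          let p := if m < K then m else 2*K-1-m
          (PySem.List.pySetD st.1 p ((PySem.List.pyGetD st.1 p []) ++ [pr.1]), st.2 + 1)) (parts, (i:Int)))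
    ∧ ((L.foldl (fun (st : List (List Int) × Int) pr =>
          let m := PySem.Int.mod st.2 (2*K)
          let p := if m < K then m else 2*K-1-m
          (PySem.List.pySetD st.1 p ((PySem.List.pyGetD st.1 p []) ++ [pr.1]), st.2 + 1)) (parts, (i:Int))).1.length = K.toNat
        ∧ ∀ p, p < K.toNat →
          (((L.foldl (fun (st : List (List Int) × Int) pr =>
          let m := PySem.Int.mod st.2 (2*K)
          let p := if m < K then m else 2*K-1-m
          (PySem.List.pySetD st.1 p ((PySem.List.pyGetD st.1 p []) ++ [pr.1]), st.2 + 1)) (parts, (i:Int))).1).getD p []).length = pvCnt K.toNat n p) := by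
  induction L with
  | nil =>
    intro i parts hL hlen hcnt
    have : i = n := by simpa using hL
    subst this
    exact ⟨rfl, hlen, hcnt⟩
  | cons pr rest ih =>
    intro i parts hL hlen hcnt
    have hi : i < n := by simp at hL; omega
    have hk' : 0 < K.toNat := by omega
    have hpNat : pvPat K.toNat i < K.toNat := by
      simp only [pvPat]
      have : i % (2*K.toNat) < 2*K.toNat := Nat.mod_lt _ (by omega)
      split_ifs <;> omega
    have hmod : PySem.Int.mod (i : Int) (2*K) = ((i % (2*K.toNat) : Nat) : Int) := by
      have h2K : (2*K) = ((2*K.toNat : Nat) : Int) := by push_cast; omega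
      rw [h2K, PySem.Int.mod_natCast]
    -- the partition index both programs compute at step i
    have hp := pvCast_p K hK i
    -- A's size test passes
    have hsize : ((parts.getD (pvPat K.toNat i) []).length : Int) < ((n / K.toNat : Nat) : Int) := by
      have := pvCnt_lt K.toNat n i (pvPat K.toNat i) hk' hi hdvd rfl
      rw [hcnt _ hpNat]
      exact_mod_cast this
    -- A's one step
    have hfuel : (2*K+2).toNat = (2*K+1).toNat + 1 := by omega
    have hAstep : pvAInner (some ((n / K.toNat : Nat) : Int))
        (PySem.List.pyRange 0 K 1 ++ PySem.List.pyRange (K - 1) (-1) (-1))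
        (((PySem.List.pyRange 0 K 1 ++ PySem.List.pyRange (K - 1) (-1) (-1)).length : Nat) : Int)
        pr.1 ((2*K+2).toNat) (parts, (i:Int))
        = (PySem.List.pySetD parts ((pvPat K.toNat i : Nat) : Int)
            ((PySem.List.pyGetD parts ((pvPat K.toNat i : Nat) : Int) []) ++ [pr.1]), (i:Int) + 1) := by
      rw [hfuel]
      simp only [pvAInner, pvPatternLen K hK,
        pvPattern_getI K hK _ (PySem.Int.mod_nonneg _ (by omega)) (PySem.Int.mod_lt _ (by omega)), hp]
      rw [if_pos]
      rw [PySem.List.pyGetD_natCast]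
      exact hsize
    -- the updated partitions
    set parts' := PySem.List.pySetD parts ((pvPat K.toNat i : Nat) : Int)
            ((PySem.List.pyGetD parts ((pvPat K.toNat i : Nat) : Int) []) ++ [pr.1]) with hparts'
    have hset : parts' = parts.set (pvPat K.toNat i) ((parts.getD (pvPat K.toNat i) []) ++ [pr.1]) := by
      rw [hparts', PySem.List.pySetD_natCast, PySem.List.pyGetD_natCast]
    have hlen' : parts'.length = K.toNat := by rw [hset, List.length_set, hlen]
    have hcnt' : ∀ p, p < K.toNat → (parts'.getD p []).length = pvCnt K.toNat (i+1) p := by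
      intro p hpp
      rw [pvCnt_succ, hset]
      by_cases hpe : p = pvPat K.toNat i
      · subst hpe
        rw [List.getD_eq_getElem?_getD,
          List.getElem?_set_self (show pvPat K.toNat i < parts.length by omega),
          Option.getD_some, if_pos rfl, List.length_append, hcnt _ hpp]
        simp
      · rw [List.getD_eq_getElem?_getD,
          List.getElem?_set_ne (show pvPat K.toNat i ≠ p from fun h => hpe h.symm),
          ← List.getD_eq_getElem?_getD, hcnt p hpp, if_neg (fun h => hpe h.symm)]
        simp
    have hcast : (i:Int) + 1 = ((i+1 : Nat) : Int) := by push_cast; ring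
    have := ih (i+1) parts' (by simp at hL ⊢; omega) hlen' hcnt'
    simp only [List.foldl_cons]
    rw [hAstep, hp, hcast]
    exact this

lemma pvLoop_eq_none (K : Int) (hK : 2 ≤ K) (L : List (Int × Int)) :
    ∀ (st : List (List Int) × Int),
    L.foldl (fun st pr => pvAInner none
        (PySem.List.pyRange 0 K 1 ++ PySem.List.pyRange (K - 1) (-1) (-1))
        (((PySem.List.pyRange 0 K 1 ++ PySem.List.pyRange (K - 1) (-1) (-1)).length : Nat) : Int)
        pr.1 ((2*K+2).toNat) st) st
      = L.foldl (fun (st : List (List Int) × Int) pr =>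
          let m := PySem.Int.mod st.2 (2*K)
          let p := if m < K then m else 2*K-1-m
          (PySem.List.pySetD st.1 p ((PySem.List.pyGetD st.1 p []) ++ [pr.1]), st.2 + 1)) st := by
  induction L with
  | nil => intro st; rfl
  | cons pr rest ih =>
    intro st
    obtain ⟨parts, ptr⟩ := st
    simp only [List.foldl_cons]
    rw [pvA_step_none K hK]
    exact ih _

-- ===== new: characterisation of the deal fold per partition, and of pvCollect =====

lemma pvPat_lt (k j : Nat) (hk : 0 < k) : pvPat k j < k := by
  simp only [pvPat]
  have : j % (2*k) < 2*k := Nat.mod_lt _ (by omega)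
  split_ifs <;> omega

lemma pvPat_eq_iff (k p j : Nat) (hk : 0 < k) (hp : p < k) :
    pvPat k j = p ↔ j % (2*k) = p ∨ j % (2*k) = 2*k-1-p := by
  simp only [pvPat]
  have : j % (2*k) < 2*k := Nat.mod_lt _ (by omega)
  split_ifs <;> omega

def pvSpec (k p : Nat) (L : List (Int × Int)) (i : Nat) : List Int :=
  (L.zipIdx i).filterMap (fun q => if pvPat k q.2 = p then some q.1.1 else none)

lemma pvDeal_char (K : Int) (hK : 2 ≤ K) (L : List (Int × Int)) :
    ∀ (i : Nat) (parts : List (List Int)), parts.length = K.toNat →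
    (L.foldl (fun (st : List (List Int) × Int) pr =>
          let m := PySem.Int.mod st.2 (2*K)
          let p := if m < K then m else 2*K-1-m
          (PySem.List.pySetD st.1 p ((PySem.List.pyGetD st.1 p []) ++ [pr.1]), st.2 + 1)) (parts, (i:Int))).1.length = K.toNat
      ∧ (∀ p, p < K.toNat →
        (L.foldl (fun (st : List (List Int) × Int) pr =>
          let m := PySem.Int.mod st.2 (2*K)
          let p := if m < K then m else 2*K-1-m
          (PySem.List.pySetD st.1 p ((PySem.List.pyGetD st.1 p []) ++ [pr.1]), st.2 + 1)) (parts, (i:Int))).1.getD p []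
          = parts.getD p [] ++ pvSpec K.toNat p L i) := by
  induction L with
  | nil =>
    intro i parts hlen
    refine ⟨hlen, fun p _ => ?_⟩
    simp [pvSpec]
  | cons pr rest ih =>
    intro i parts hlen
    have hk' : 0 < K.toNat := by omega
    have hpNat : pvPat K.toNat i < K.toNat := pvPat_lt _ _ hk'
    have hp := pvCast_p K hK i
    simp only [List.foldl_cons]
    rw [hp]
    set parts' := PySem.List.pySetD parts ((pvPat K.toNat i : Nat) : Int)
            ((PySem.List.pyGetD parts ((pvPat K.toNat i : Nat) : Int) []) ++ [pr.1]) with hparts'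
    have hset : parts' = parts.set (pvPat K.toNat i) ((parts.getD (pvPat K.toNat i) []) ++ [pr.1]) := by
      rw [hparts', PySem.List.pySetD_natCast, PySem.List.pyGetD_natCast]
    have hlen' : parts'.length = K.toNat := by rw [hset, List.length_set, hlen]
    have hcast : (i:Int) + 1 = ((i+1 : Nat) : Int) := by push_cast; ring
    rw [hcast]
    obtain ⟨ihlen, ihchar⟩ := ih (i+1) parts' hlen'
    refine ⟨ihlen, fun p hpp => ?_⟩
    rw [ihchar p hpp]
    have hspec : pvSpec K.toNat p (pr :: rest) i
        = (if pvPat K.toNat i = p then [pr.1] else []) ++ pvSpec K.toNat p rest (i+1) := by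
      simp only [pvSpec, List.zipIdx_cons, List.filterMap_cons]
      split_ifs <;> simp
    rw [hspec]
    have hgd : parts'.getD p [] = parts.getD p [] ++ (if pvPat K.toNat i = p then [pr.1] else []) := by
      rw [hset]
      by_cases hpe : pvPat K.toNat i = p
      · subst hpe
        rw [List.getD_eq_getElem?_getD,
          List.getElem?_set_self (show pvPat K.toNat i < parts.length by omega),
          Option.getD_some, if_pos rfl]
      · rw [List.getD_eq_getElem?_getD, List.getElem?_set_ne hpe,
          ← List.getD_eq_getElem?_getD, if_neg hpe, List.append_nil]
    rw [hgd, List.append_assoc]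

lemma pvSpec_eq_filter (k p : Nat) (L : List (Int × Int)) :
    pvSpec k p L 0
      = ((List.range L.length).filter (fun j => decide (pvPat k j = p))).map
          (fun j => (L.map (fun pr => pr.1)).getD j 0) := by
  induction L using List.reverseRecOn with
  | nil => simp [pvSpec]
  | append_singleton L x ih =>
    have hzip : (L ++ [x]).zipIdx 0 = L.zipIdx 0 ++ [(x, L.length)] := by
      rw [List.zipIdx_append]
      simp
    have hlen : (L ++ [x]).length = L.length + 1 := by simp
    rw [hlen, List.range_succ, List.filter_append, List.map_append]
    have h1 : ((List.range L.length).filter (fun j => decide (pvPat k j = p))).map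
          (fun j => ((L ++ [x]).map (fun pr => pr.1)).getD j 0)
        = ((List.range L.length).filter (fun j => decide (pvPat k j = p))).map
          (fun j => (L.map (fun pr => pr.1)).getD j 0) := by
      apply List.map_congr_left
      intro j hj
      have hjl : j < L.length := by
        have := List.mem_range.mp (List.mem_of_mem_filter hj)
        exact this
      rw [List.map_append, List.getD_eq_getElem?_getD,
        List.getElem?_append_left (by simpa using hjl), ← List.getD_eq_getElem?_getD]
    have h2 : (([L.length].filter (fun j => decide (pvPat k j = p))).map
          (fun j => ((L ++ [x]).map (fun pr => pr.1)).getD j 0))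
        = if pvPat k L.length = p then [x.1] else [] := by
      by_cases hc : pvPat k L.length = p
      · simp only [List.filter, hc, decide_true, List.map]
        rw [List.map_append, List.getD_eq_getElem?_getD]
        simp
      · simp [List.filter, hc]
    rw [h1, h2, ← ih]
    simp only [pvSpec, hzip, List.filterMap_append]
    congr 1
    by_cases hc : pvPat k L.length = p <;> simp [hc]

lemma pvMemWin (n k t p j : Nat) (hk : 0 < k) (hp : p < k) :
    (j < n ∧ 2*k*t ≤ j ∧ pvPat k j = p)
      ↔ ((2*k*t+p < n ∧ j = 2*k*t+p) ∨ (2*k*t+(2*k-1-p) < n ∧ j = 2*k*t+(2*k-1-p))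
          ∨ (j < n ∧ 2*k*(t+1) ≤ j ∧ pvPat k j = p)) := by
  have hmodc : ∀ r, r < 2*k → (2*k*t + r) % (2*k) = r := by
    intro r hr
    rw [Nat.mul_comm 2 k] at *
    have := Nat.mul_add_mod (k*2) t r
    rw [this, Nat.mod_eq_of_lt hr]
  have hstep : 2*k*(t+1) = 2*k*t + 2*k := by ring
  constructor
  · rintro ⟨hjn, hjt, hpat⟩
    rw [pvPat_eq_iff _ _ _ hk hp] at hpat
    by_cases hw : j < 2*k*(t+1)
    · obtain ⟨r, hr⟩ : ∃ r, j = 2*k*t + r := ⟨j - 2*k*t, by omega⟩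
      have hrlt : r < 2*k := by omega
      have hmod : j % (2*k) = r := by rw [hr]; exact hmodc _ hrlt
      rcases hpat with h | h
      · left; constructor <;> omega
      · right; left; constructor <;> omega
    · right; right
      exact ⟨hjn, by omega, (pvPat_eq_iff _ _ _ hk hp).mpr hpat⟩
  · rintro (⟨hlt, rfl⟩ | ⟨hlt, rfl⟩ | ⟨h1, h2, h3⟩)
    · refine ⟨hlt, by omega, ?_⟩
      rw [pvPat_eq_iff _ _ _ hk hp]
      left; exact hmodc _ (by omega)
    · refine ⟨hlt, by omega, ?_⟩
      rw [pvPat_eq_iff _ _ _ hk hp]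
      right; exact hmodc _ (by omega)
    · exact ⟨h1, by omega, h3⟩

lemma pvFilter_window (n k t p : Nat) (hk : 0 < k) (hp : p < k) :
    (List.range n).filter (fun j => decide (2*k*t ≤ j ∧ pvPat k j = p))
      = (if 2*k*t+p < n then [2*k*t+p] else []) ++
        ((if 2*k*t+(2*k-1-p) < n then [2*k*t+(2*k-1-p)] else []) ++
          (List.range n).filter (fun j => decide (2*k*(t+1) ≤ j ∧ pvPat k j = p))) := by
  have hsortL : List.Pairwise (· < ·) ((List.range n).filter (fun j => decide (2*k*t ≤ j ∧ pvPat k j = p))) :=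
    List.Pairwise.sublist List.filter_sublist List.pairwise_lt_range
  have hsortT : List.Pairwise (· < ·) ((List.range n).filter (fun j => decide (2*k*(t+1) ≤ j ∧ pvPat k j = p))) :=
    List.Pairwise.sublist List.filter_sublist List.pairwise_lt_range
  have hstep : 2*k*(t+1) = 2*k*t + 2*k := by ring
  have htail : ∀ j ∈ (List.range n).filter (fun j => decide (2*k*(t+1) ≤ j ∧ pvPat k j = p)), 2*k*(t+1) ≤ j := by
    intro j hj
    have := List.of_mem_filter hj
    simp only [decide_eq_true_eq] at this
    exact this.1
  have hsortR : List.Pairwise (· < ·)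
      ((if 2*k*t+p < n then [2*k*t+p] else []) ++
        ((if 2*k*t+(2*k-1-p) < n then [2*k*t+(2*k-1-p)] else []) ++
          (List.range n).filter (fun j => decide (2*k*(t+1) ≤ j ∧ pvPat k j = p)))) := by
    rw [List.pairwise_append]
    refine ⟨?_, ?_, ?_⟩
    · split_ifs <;> simp
    · rw [List.pairwise_append]
      refine ⟨by split_ifs <;> simp, hsortT, ?_⟩
      intro a ha b hb
      have hb' := htail b hb
      split_ifs at ha with h
      · simp at ha; omega
      · simp at ha
    · intro a ha b hb
      split_ifs at ha with h
      · simp at ha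
        subst ha
        rcases List.mem_append.mp hb with hb1 | hb2
        · split_ifs at hb1 with h2
          · simp at hb1; omega
          · simp at hb1
        · have := htail b hb2; omega
      · simp at ha
  apply List.Perm.eq_of_pairwise (le := (· < ·)) (fun a b _ _ h1 h2 => by omega) hsortL hsortR
  rw [List.perm_ext_iff_of_nodup
    (hsortL.imp (fun h => Nat.ne_of_lt h)) (hsortR.imp (fun h => Nat.ne_of_lt h))]
  intro a
  have := pvMemWin n k t p a hk hp
  simp only [List.mem_append, List.mem_filter, List.mem_range, decide_eq_true_eq]
  constructor
  · rintro ⟨h1, h2, h3⟩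
    rcases this.mp ⟨h1, h2, h3⟩ with h | h | h
    · left; rw [if_pos h.1]; simp [h.2]
    · right; left; rw [if_pos h.1]; simp [h.2]
    · right; right; exact ⟨h.1, h.2⟩
  · rintro (h | h | h)
    · split_ifs at h with hc
      · simp at h; exact this.mpr (Or.inl ⟨hc, h⟩)
      · simp at h
    · split_ifs at h with hc
      · simp at h; exact this.mpr (Or.inr (Or.inl ⟨hc, h⟩))
      · simp at h
    · exact this.mpr (Or.inr (Or.inr ⟨h.1, h.2⟩))

lemma pvCollect_eq (order : List Int) (k p : Nat) (hk : 0 < k) (hp : p < k) :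
    ∀ (fuel t : Nat), order.length ≤ 2*k*t + fuel →
    pvCollect order (order.length : Int) ((2*k : Nat) : Int) fuel
        ((2*k*t+p : Nat) : Int) ((2*k*t+(2*k-1-p) : Nat) : Int)
      = ((List.range order.length).filter (fun j => decide (2*k*t ≤ j ∧ pvPat k j = p))).map
          (fun j => order.getD j 0) := by
  intro fuel
  induction fuel with
  | zero =>
    intro t hle
    simp only [pvCollect]
    symm
    rw [List.map_eq_nil_iff, List.filter_eq_nil_iff]
    intro j hj
    have := List.mem_range.mp hj
    simp only [decide_eq_true_eq]
    omega
  | succ fuel ih =>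
    intro t hle
    simp only [pvCollect]
    by_cases hlo : 2*k*t+p < order.length
    · rw [if_pos (by exact_mod_cast hlo)]
      have hlo' : PySem.List.pyGetD order ((2*k*t+p : Nat) : Int) 0 = order.getD (2*k*t+p) 0 := by
        rw [PySem.List.pyGetD_natCast]
      have hhi' : (if ((2*k*t+(2*k-1-p) : Nat) : Int) < (order.length : Int)
            then [PySem.List.pyGetD order ((2*k*t+(2*k-1-p) : Nat) : Int) 0] else [])
          = if 2*k*t+(2*k-1-p) < order.length then [order.getD (2*k*t+(2*k-1-p)) 0] else [] := by
        rw [PySem.List.pyGetD_natCast]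
        simp only [Nat.cast_lt]
      have hcast1 : ((2*k*t+p : Nat) : Int) + ((2*k : Nat) : Int) = ((2*k*(t+1)+p : Nat) : Int) := by
        push_cast; ring
      have hcast2 : ((2*k*t+(2*k-1-p) : Nat) : Int) + ((2*k : Nat) : Int)
          = ((2*k*(t+1)+(2*k-1-p) : Nat) : Int) := by
        have h1 : 1 + p ≤ 2*k := by omega
        push_cast [Nat.sub_sub, h1]
        ring_nf
      rw [hlo', hhi', hcast1, hcast2, ih (t+1) (by omega)]
      rw [pvFilter_window order.length k t p hk hp, List.map_append, List.map_append]
      rw [if_pos hlo]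
      simp only [List.map_cons, List.map_nil, List.cons_append, List.nil_append]
      congr 1
      congr 1
      split_ifs <;> simp
    · rw [if_neg (by exact_mod_cast hlo)]
      symm
      rw [List.map_eq_nil_iff, List.filter_eq_nil_iff]
      intro j hj
      have hjn := List.mem_range.mp hj
      simp only [decide_eq_true_eq]
      intro ⟨h1, h2⟩
      rw [pvPat_eq_iff _ _ _ hk hp] at h2
      obtain ⟨r, hr⟩ : ∃ r, j = 2*k*t + r := ⟨j - 2*k*t, by omega⟩
      have hrlt : r < 2*k := by omega
      have hmod : j % (2*k) = r := by
        rw [hr, Nat.mul_comm 2 k, Nat.mul_add_mod, Nat.mod_eq_of_lt (by omega)]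
      omega

lemma pvArith_eq_B (K : Int) (hK : 2 ≤ K) (L : List (Int × Int)) :
    (L.foldl (fun (st : List (List Int) × Int) pr =>
          let m := PySem.Int.mod st.2 (2*K)
          let p := if m < K then m else 2*K-1-m
          (PySem.List.pySetD st.1 p ((PySem.List.pyGetD st.1 p []) ++ [pr.1]), st.2 + 1))
        (List.replicate K.toNat [], (0:Int))).1
      = (PySem.List.pyRange 0 K 1).map
          (fun p => pvCollect (L.map (fun pr => pr.1)) (((L.map (fun pr => pr.1)).length : Nat) : Int)
            (2*K) ((L.map (fun pr => pr.1)).length + 1) p (2*K - 1 - p)) := by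
  have h0 : ((0:Nat) : Int) = (0:Int) := by norm_num
  obtain ⟨hlen, hchar⟩ := pvDeal_char K hK L 0 (List.replicate K.toNat []) (by simp)
  rw [h0] at hlen hchar
  have hk' : 0 < K.toNat := by omega
  have hKK : K = ((K.toNat : Nat) : Int) := by omega
  apply List.ext_getElem
  · rw [hlen, List.length_map, PySem.List.length_pyRange_one]
    omega
  · intro i h1 h2
    have hiK : i < K.toNat := by rwa [hlen] at h1
    rw [List.getElem_map, PySem.List.getElem_pyRange_one]
    have hargs1 : (0 : Int) + (i : Int) = ((2*K.toNat*0 + i : Nat) : Int) := by push_cast; ring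
    have hargs2 : 2*K - 1 - ((0:Int) + (i:Int)) = ((2*K.toNat*0 + (2*K.toNat-1-i) : Nat) : Int) := by
      have hle1 : 1 + i ≤ 2*K.toNat := by omega
      push_cast [Nat.sub_sub, hle1]
      omega
    have h2K : (2*K : Int) = ((2*K.toNat : Nat) : Int) := by push_cast; omega
    have hfl : (L.map (fun pr => pr.1)).length = L.length := by simp
    conv_rhs => rw [hargs2, hargs1, h2K]
    rw [pvCollect_eq (L.map (fun pr => pr.1)) K.toNat i hk' hiK
      ((L.map (fun pr => pr.1)).length + 1) 0 (by omega)]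
    have hfilter : (List.range (L.map (fun pr => pr.1)).length).filter
          (fun j => decide (2*K.toNat*0 ≤ j ∧ pvPat K.toNat j = i))
        = (List.range L.length).filter (fun j => decide (pvPat K.toNat j = i)) := by
      rw [hfl]
      apply List.filter_congr
      intro j _
      simp
    rw [hfilter]
    have hgetd := hchar i hiK
    rw [List.getD_replicate _ hiK, List.nil_append, pvSpec_eq_filter] at hgetd
    rw [← hgetd, List.getD_eq_getElem?_getD, List.getElem?_eq_getElem h1, Option.getD_some]

lemma pvMain : ∀ (xs : List Int) (K : Int) (eq : Bool),
    (0 < K ∧ K ≤ (xs.length : Int) ∧ (eq = true → PySem.Int.mod (xs.length : Int) K = 0)) →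
    snake_partition_full xs K eq = snake_partition_full_alt xs K eq := by
  intro xs K eq hpre
  obtain ⟨hk, hlen, heq⟩ := hpre
  by_cases hK1 : K = 1
  · simp only [snake_partition_full, snake_partition_full_alt, hK1]
    norm_num
  have hK2 : 2 ≤ K := by omega
  have g1 : ¬¬(K > 0) := by omega
  have g2 : ¬¬((xs.length : Int) ≥ K) := by omega
  have hLlen : (PySem.List.sorted (PySem.List.enumerate xs 0) (fun x => x.2) true).length = xs.length := by
    rw [PySem.List.length_sorted, PySem.List.length_enumerate]
  cases eq with
  | false =>
    simp only [snake_partition_full, snake_partition_full_alt]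
    rw [if_neg g1, if_neg g2, if_neg hK1, if_neg (by simp),
        if_neg g1, if_neg g2, if_neg hK1, if_neg (by simp)]
    simp only [Bool.false_eq_true]
    rw [pvLoop_eq_none K hK2 _ _]
    rw [pvArith_eq_B K hK2]
    simp [hLlen]
  | true =>
    have hmod0 : PySem.Int.mod (xs.length : Int) K = 0 := heq rfl
    have hKc : K = ((K.toNat : Nat) : Int) := by omega
    have hdvdI : (K : Int) ∣ (xs.length : Int) := (PySem.Int.mod_eq_zero_iff_dvd _ _).mp hmod0
    have hdvd : K.toNat ∣ xs.length := by
      rw [hKc] at hdvdI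
      exact_mod_cast hdvdI
    have ht : PySem.Int.floordiv (xs.length : Int) K = ((xs.length / K.toNat : Nat) : Int) := by
      conv_lhs => rw [hKc]
      exact PySem.Int.floordiv_natCast _ _
    have h4 : ¬(True ∧ ¬PySem.Int.mod (xs.length : Int) K = 0) := by simp [hmod0]
    have h5 : (if True then some (PySem.Int.floordiv (xs.length : Int) K) else none)
        = some ((xs.length / K.toNat : Nat) : Int) := by rw [if_pos trivial, ht]
    simp only [snake_partition_full, snake_partition_full_alt]
    rw [if_neg g1, if_neg g2, if_neg hK1, if_neg h4,
        if_neg g1, if_neg g2, if_neg hK1, if_neg h4]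
    rw [h5]
    dsimp only
    have hmain := pvLoop_eq_some K hK2 xs.length hdvd
      (PySem.List.sorted (PySem.List.enumerate xs 0) (fun x => x.2) true) 0 (List.replicate K.toNat [])
      (by simp [hLlen]) (by simp)
      (by intro p hp; simp [List.getD_eq_getElem?_getD, hp, pvCnt])
    simp only [Nat.cast_zero] at hmain
    obtain ⟨hfold, hflen, hfcnt⟩ := hmain
    rw [hfold]
    rw [if_pos]
    · rw [pvArith_eq_B K hK2]
    · apply List.all_eq_true.mpr
      intro partition hmem
      obtain ⟨j, hj, hjp⟩ := List.mem_iff_getElem.mp hmem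
      have hj' : j < K.toNat := by omega
      have hKn := hfcnt j hj'
      rw [List.getD_eq_getElem?_getD, List.getElem?_eq_getElem hj, Option.getD_some, hjp] at hKn
      rw [pvCnt_full K.toNat xs.length j (by omega) hj' hdvd] at hKn
      simp [hKn]

-- ===== VERDICT (by name: the statement is the Claim_ definition above) =====
theorem snake_partition_full_spec : Claim_equal_snake_partition_full := by
  intro seqlen_list k_partitions equal_size _hdom hpre
  show snake_partition_full seqlen_list k_partitions equal_size
      = snake_partition_full_alt seqlen_list k_partitions equal_size
  exact pvMain seqlen_list k_partitions equal_size hpre
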